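-- pv_equiv track=rewrite | github.com/Soumali13/LearningPathGen | learning_path.py | build_path_from_knowledge_graph
-- ===== SOURCE A (Python) =====
-- def build_path_from_knowledge_graph(goal_concept, known_concepts, struggling_concepts, knowledge_graph):
--     """
--     Recursively builds a path of prerequisites for the goal_concept,
--     skipping concepts already in known_concepts.
--     Struggling concepts are prioritized to appear earlier if possible.
--     """
--     path = []
--     visited = set()
--
--     def dfs(concept):
--         if concept in visited or concept in known_concepts:
--             return
--         visited.add(concept)
--         for prereq in knowledge_graph.get(concept, {}).get("prerequisites", []):
--             dfs(prereq)
--         path.append(concept)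
--
--     # First, add struggling concepts and their prerequisites
--     for s_concept in struggling_concepts:
--         dfs(s_concept);
--     # Then, add the goal concept and its prerequisites
--     dfs(goal_concept);
--
--     # Remove duplicates while preserving order
--     seen = set();
--     ordered_path = [];
--     for c in path:
--         if c not in seen:
--             seen.add(c);
--             ordered_path.append(c);
--     return ordered_path;
-- ===== SOURCE B (Python) =====
-- def build_path_from_knowledge_graph(goal_concept, known_concepts, struggling_concepts, knowledge_graph):
--     """Iterative explicit-stack DFS producing the same post-order; the visited
--     set already guarantees uniqueness, so no dedup pass is needed."""
--     path = []
--     visited = set()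
--     for concept in list(struggling_concepts) + [goal_concept]:
--         stack = [(concept, False)]
--         while stack:
--             node, processed = stack.pop()
--             if processed:
--                 path.append(node)
--             elif node not in visited and node not in known_concepts:
--                 visited.add(node)
--                 stack.append((node, True))
--                 for p in reversed(knowledge_graph.get(node, {}).get("prerequisites", [])):
--                     stack.append((p, False))
--     return path
-- ===== Notes on version B (the rewrite author's own statement) =====
-- stated objective: alternative
-- what changed: Replaces A's recursive dfs helper plus a second duplicate-removal pass by a single iterative explicit-stack DFS (two-state enter/emit entries, children pushed in reverse) whose visited set already guarantees a duplicate-free path.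
import Mathlib
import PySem

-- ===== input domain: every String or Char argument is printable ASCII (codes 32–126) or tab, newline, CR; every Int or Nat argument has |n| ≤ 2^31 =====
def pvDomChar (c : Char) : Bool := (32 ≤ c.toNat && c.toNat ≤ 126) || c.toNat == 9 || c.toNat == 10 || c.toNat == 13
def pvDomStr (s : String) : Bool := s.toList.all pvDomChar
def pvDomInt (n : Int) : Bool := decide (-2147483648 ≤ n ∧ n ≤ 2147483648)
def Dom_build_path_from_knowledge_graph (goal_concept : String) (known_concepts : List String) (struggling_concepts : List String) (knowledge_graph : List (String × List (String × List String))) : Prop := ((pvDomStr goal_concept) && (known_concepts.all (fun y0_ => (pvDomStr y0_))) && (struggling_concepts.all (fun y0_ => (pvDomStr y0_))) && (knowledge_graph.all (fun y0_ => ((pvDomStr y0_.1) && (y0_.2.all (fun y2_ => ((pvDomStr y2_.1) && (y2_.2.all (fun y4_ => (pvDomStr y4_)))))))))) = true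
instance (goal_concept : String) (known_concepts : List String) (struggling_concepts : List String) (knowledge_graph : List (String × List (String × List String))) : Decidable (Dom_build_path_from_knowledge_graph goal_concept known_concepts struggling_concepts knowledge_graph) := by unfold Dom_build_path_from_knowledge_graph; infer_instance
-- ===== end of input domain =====

-- B replaces A's recursive dfs + final dedup pass by a single iterative explicit-stack
-- DFS (two-state entries) whose visited set already guarantees uniqueness (objective:
-- alternative — no recursion and no second dedup pass, same post-order result).

-- shared accessor: knowledge_graph.get(concept, {}).get("prerequisites", [])
def pvPrereqs (knowledge_graph : List (String × List (String × List String))) (c : String) : List String :=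
  PySem.Dict.getD (PySem.Dict.mk (PySem.Dict.getD (PySem.Dict.mk knowledge_graph) c [])) "prerequisites" []

-- ===== PORT A =====
-- A's inner `def dfs(concept)` (recursion over prerequisites; the `for prereq in …` loop
-- is pvDfsListA), with the mutated (visited, path) state threaded explicitly.  The fuel
-- argument only makes the recursion structurally total; `knowledge_graph.length + 2`
-- exceeds the recursion depth (each nested nontrivial call freshly visits a distinct key).
mutual
def pvDfsA (known_concepts : List String) (knowledge_graph : List (String × List (String × List String))) : Nat → String → (List String × List String) → (List String × List String)
  | 0, _, st => st
  | fuel + 1, c, (vis, path) =>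
    if PySem.Set.contains vis c || known_concepts.contains c then (vis, path)
    else
      let st1 := pvDfsListA known_concepts knowledge_graph fuel (pvPrereqs knowledge_graph c) (PySem.Set.add vis c, path)
      (st1.1, st1.2 ++ [c])
termination_by fuel _ _ => (fuel, 0)
def pvDfsListA (known_concepts : List String) (knowledge_graph : List (String × List (String × List String))) : Nat → List String → (List String × List String) → (List String × List String)
  | _, [], st => st
  | fuel, p :: ps, st => pvDfsListA known_concepts knowledge_graph fuel ps (pvDfsA known_concepts knowledge_graph fuel p st)
termination_by fuel l _ => (fuel, l.length + 1)
end

def build_path_from_knowledge_graph (goal_concept : String) (known_concepts : List String) (struggling_concepts : List String) (knowledge_graph : List (String × List (String × List String))) : List String :=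
  let fuel := knowledge_graph.length + 2
  -- for s_concept in struggling_concepts: dfs(s_concept)
  let st0 := struggling_concepts.foldl (fun st s => pvDfsA known_concepts knowledge_graph fuel s st) ([], [])
  -- dfs(goal_concept)
  let st1 := pvDfsA known_concepts knowledge_graph fuel goal_concept st0
  -- remove duplicates while preserving order
  let fin := st1.2.foldl (fun (acc : List String × List String) c =>
      if PySem.Set.contains acc.1 c then acc else (PySem.Set.add acc.1 c, acc.2 ++ [c]))
    (([] : List String), ([] : List String))
  fin.2

-- ===== PORT B =====
-- B's `while stack:` loop; the fuel argument only makes the loop structurally total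
-- (one unit per iteration; the bound computed in the caller exceeds the iteration count).
def pvLoopB (known_concepts : List String) (knowledge_graph : List (String × List (String × List String))) : Nat → List (String × Bool) → (List String × List String) → (List String × List String)
  | _, [], st => st
  | 0, _ :: _, st => st
  | fuel + 1, (node, processed) :: stack, (vis, path) =>
    if processed then
      pvLoopB known_concepts knowledge_graph fuel stack (vis, path ++ [node])
    else if !PySem.Set.contains vis node && !known_concepts.contains node then
      pvLoopB known_concepts knowledge_graph fuel
        ((pvPrereqs knowledge_graph node).reverse.foldl (fun s p => (p, false) :: s) ((node, true) :: stack))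
        (PySem.Set.add vis node, path)
    else
      pvLoopB known_concepts knowledge_graph fuel stack (vis, path)

-- fuel bound for pvLoopB: total prerequisite mass of the graph
def pvSumPrereqs (knowledge_graph : List (String × List (String × List String))) : Nat :=
  knowledge_graph.foldl (fun a e => a + (PySem.Dict.getD (PySem.Dict.mk e.2) "prerequisites" []).length) 0

def build_path_from_knowledge_graph_alt (goal_concept : String) (known_concepts : List String) (struggling_concepts : List String) (knowledge_graph : List (String × List (String × List String))) : List String :=
  let fuel := (2 * pvSumPrereqs knowledge_graph + 2) * (knowledge_graph.length + 1) + 2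
  ((struggling_concepts ++ [goal_concept]).foldl
      (fun st c => pvLoopB known_concepts knowledge_graph fuel [(c, false)] st) ([], [])).2

-- ===== PRECONDITION & SPEC =====
def Spec_build_path_from_knowledge_graph (goal_concept : String) (known_concepts : List String) (struggling_concepts : List String) (knowledge_graph : List (String × List (String × List String))) (out : List String) : Prop := out = build_path_from_knowledge_graph_alt goal_concept known_concepts struggling_concepts knowledge_graph
instance (goal_concept : String) (known_concepts : List String) (struggling_concepts : List String) (knowledge_graph : List (String × List (String × List String))) (out : List String) : Decidable (Spec_build_path_from_knowledge_graph goal_concept known_concepts struggling_concepts knowledge_graph out) := by unfold Spec_build_path_from_knowledge_graph; infer_instance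

-- ===== CLAIM (what is proved, stated in full; the proofs are below) =====
def Claim_equal_build_path_from_knowledge_graph : Prop := ∀ (goal_concept : String) (known_concepts : List String) (struggling_concepts : List String) (knowledge_graph : List (String × List (String × List String))), Dom_build_path_from_knowledge_graph goal_concept known_concepts struggling_concepts knowledge_graph → Spec_build_path_from_knowledge_graph goal_concept known_concepts struggling_concepts knowledge_graph (build_path_from_knowledge_graph goal_concept known_concepts struggling_concepts knowledge_graph)

-- ===== LEMMAS AND PROOFS =====

-- number of graph keys not yet visited (the termination/budget potential)
def pvPhi (knowledge_graph : List (String × List (String × List String))) (vis : List String) : Nat :=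
  ((knowledge_graph.map Prod.fst).filter (fun s => !PySem.Set.contains vis s)).length

def pvK (knowledge_graph : List (String × List (String × List String))) : Nat :=
  2 * pvSumPrereqs knowledge_graph + 2

lemma pvPhi_le_length (kg : List (String × List (String × List String))) (vis : List String) :
    pvPhi kg vis ≤ kg.length := by
  calc ((kg.map Prod.fst).filter _).length ≤ (kg.map Prod.fst).length := List.length_filter_le _ _
  _ = kg.length := by simp

lemma pvContains_add (vis : List String) (c x : String) (h : PySem.Set.contains vis x = true) :
    PySem.Set.contains (PySem.Set.add vis c) x = true := by
  rw [PySem.Set.contains_iff] at h ⊢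
  rw [PySem.Set.mem_add]; exact Or.inl h

lemma pvContains_add_self (vis : List String) (c : String) :
    PySem.Set.contains (PySem.Set.add vis c) c = true := by
  rw [PySem.Set.contains_iff, PySem.Set.mem_add]; exact Or.inr rfl

lemma pvContains_add_ne (vis : List String) (c x : String) (h : PySem.Set.contains vis x = false)
    (hne : x ≠ c) : PySem.Set.contains (PySem.Set.add vis c) x = false := by
  rw [← Bool.not_eq_true, PySem.Set.contains_iff] at h ⊢
  rw [PySem.Set.mem_add]; rintro (h1 | h1) <;> [exact h h1; exact hne h1]

lemma pvPhi_mono (kg : List (String × List (String × List String))) (vis vis' : List String)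
    (h : ∀ x, PySem.Set.contains vis x = true → PySem.Set.contains vis' x = true) :
    pvPhi kg vis' ≤ pvPhi kg vis := by
  apply List.Sublist.length_le
  apply List.monotone_filter_right
  intro a ha
  simp only [Bool.not_eq_true'] at ha ⊢
  cases hv : PySem.Set.contains vis a
  · rfl
  · rw [h a hv] at ha; exact ha

lemma pvPhi_add_le (kg : List (String × List (String × List String))) (vis : List String) (c : String) :
    pvPhi kg (PySem.Set.add vis c) ≤ pvPhi kg vis :=
  pvPhi_mono kg vis _ (fun x hx => pvContains_add vis c x hx)

lemma pvPhi_add_lt (kg : List (String × List (String × List String))) (vis : List String) (c : String)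
    (hk : c ∈ kg.map Prod.fst) (hf : PySem.Set.contains vis c = false) :
    pvPhi kg (PySem.Set.add vis c) + 1 ≤ pvPhi kg vis := by
  have himp : ∀ a, (!PySem.Set.contains (PySem.Set.add vis c) a) = true → (!PySem.Set.contains vis a) = true := by
    intro a ha
    simp only [Bool.not_eq_true'] at ha ⊢
    cases hv : PySem.Set.contains vis a
    · rfl
    · rw [pvContains_add vis c a hv] at ha; exact ha
  have hs := List.monotone_filter_right (kg.map Prod.fst) himp
  have hne : (kg.map Prod.fst).filter (fun s => !PySem.Set.contains (PySem.Set.add vis c) s)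
      ≠ (kg.map Prod.fst).filter (fun s => !PySem.Set.contains vis s) := by
    intro he
    have hc1 : c ∈ (kg.map Prod.fst).filter (fun s => !PySem.Set.contains vis s) :=
      List.mem_filter.2 ⟨hk, by simp only [Bool.not_eq_true']; exact hf⟩
    rw [← he, List.mem_filter] at hc1
    have h2 := hc1.2
    rw [pvContains_add_self] at h2
    exact absurd h2 (by decide)
  have hlt := Nat.lt_of_le_of_ne hs.length_le (fun hl => hne (hs.eq_of_length hl))
  unfold pvPhi
  omega

-- prereqs of any concept fit inside the total prerequisite mass
lemma pvPrereqs_le_sum (kg : List (String × List (String × List String))) (c : String) :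
    (pvPrereqs kg c).length ≤ pvSumPrereqs kg := by
  unfold pvPrereqs pvSumPrereqs
  rw [PySem.List.foldl_add_nat]
  cases hg : PySem.Dict.get? (PySem.Dict.mk kg) c with
  | none =>
    have h1 : PySem.Dict.getD (PySem.Dict.mk kg) c [] = [] := by simp [PySem.Dict.getD, hg]
    rw [h1]
    simp [PySem.Dict.getD, PySem.Dict.get?]
  | some d =>
    simp only [PySem.Dict.getD, hg, Option.getD_some]
    obtain ⟨e, he, hed⟩ : ∃ e ∈ kg, e.2 = d := by
      simp only [PySem.Dict.get?, Option.map_eq_some_iff] at hg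
      obtain ⟨e, h1, h2⟩ := hg
      exact ⟨e, List.mem_of_find?_eq_some h1, h2⟩
    subst hed
    have hmem : (((PySem.Dict.mk e.2).get? "prerequisites").getD []).length
        ∈ kg.map (fun e => (PySem.Dict.getD (PySem.Dict.mk e.2) "prerequisites" []).length) :=
      List.mem_map.2 ⟨e, he, rfl⟩
    have h3 := List.single_le_sum (l := kg.map (fun e => (PySem.Dict.getD (PySem.Dict.mk e.2) "prerequisites" []).length)) (fun x _ => Nat.zero_le x) _ hmem
    simp only [PySem.Dict.getD] at h3 ⊢
    omega

-- a concept with no entry in the graph has no prerequisites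
lemma pvPrereqs_of_not_key (kg : List (String × List (String × List String))) (c : String)
    (h : ¬ c ∈ kg.map Prod.fst) : pvPrereqs kg c = [] := by
  have hg : PySem.Dict.get? (PySem.Dict.mk kg) c = none := by
    simp only [PySem.Dict.get?, Option.map_eq_none_iff]
    rw [List.find?_eq_none]
    intro e hem hbe
    exact h (List.mem_map.2 ⟨e, hem, by simpa using hbe⟩)
  have h1 : PySem.Dict.getD (PySem.Dict.mk kg) c [] = [] := by simp [PySem.Dict.getD, hg]
  unfold pvPrereqs
  rw [h1]
  rfl

-- dfs only grows the visited set
lemma pvDfsA_grow (known : List String) (kg : List (String × List (String × List String))) :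
    ∀ fuel, (∀ c st x, PySem.Set.contains st.1 x = true → PySem.Set.contains (pvDfsA known kg fuel c st).1 x = true)
      ∧ (∀ ps st x, PySem.Set.contains st.1 x = true → PySem.Set.contains (pvDfsListA known kg fuel ps st).1 x = true) := by
  intro fuel
  induction fuel with
  | zero =>
    refine ⟨fun c st x h => by rwa [pvDfsA], fun ps => ?_⟩
    induction ps with
    | nil => intro st x h; rwa [pvDfsListA]
    | cons p ps ihp => intro st x h; rw [pvDfsListA]; exact ihp _ _ (by rwa [pvDfsA])
  | succ n ih =>
    have hdfs : ∀ c st x, PySem.Set.contains st.1 x = true → PySem.Set.contains (pvDfsA known kg (n+1) c st).1 x = true := by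
      intro c st x h
      obtain ⟨vis, path⟩ := st
      rw [pvDfsA]
      split
      · exact h
      · exact ih.2 (pvPrereqs kg c) (PySem.Set.add vis c, path) x (pvContains_add _ _ _ h)
    refine ⟨hdfs, fun ps => ?_⟩
    induction ps with
    | nil => intro st x h; rwa [pvDfsListA]
    | cons p ps ihp => intro st x h; rw [pvDfsListA]; exact ihp _ _ (hdfs p st x h)

-- push loop = map-prepend
lemma pvPush_eq (ps : List String) (t : List (String × Bool)) :
    ps.reverse.foldl (fun s p => (p, false) :: s) t = ps.map (fun p => (p, false)) ++ t := by
  induction ps generalizing t with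
  | nil => rfl
  | cons a l ih => simp [List.foldl_append, ih]

lemma pvPhi_dfs_le (known : List String) (kg : List (String × List (String × List String)))
    (fuel : Nat) (c : String) (st : List String × List String) :
    pvPhi kg (pvDfsA known kg fuel c st).1 ≤ pvPhi kg st.1 :=
  pvPhi_mono kg st.1 _ (fun x hx => (pvDfsA_grow known kg fuel).1 c st x hx)

-- single-step unfoldings of the stack loop
lemma pvLoopB_nil (known : List String) (kg : List (String × List (String × List String)))
    (fb : Nat) (st : List String × List String) : pvLoopB known kg fb [] st = st := by
  rw [pvLoopB]

lemma pvLoopB_step_true (known : List String) (kg : List (String × List (String × List String)))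
    (fb : Nat) (node : String) (stack : List (String × Bool)) (vis path : List String) :
    pvLoopB known kg (fb + 1) ((node, true) :: stack) (vis, path)
      = pvLoopB known kg fb stack (vis, path ++ [node]) := by
  rw [pvLoopB, if_pos (rfl : (true : Bool) = true)]

lemma pvLoopB_step_skip (known : List String) (kg : List (String × List (String × List String)))
    (fb : Nat) (node : String) (stack : List (String × Bool)) (vis path : List String)
    (h : (PySem.Set.contains vis node || known.contains node) = true) :
    pvLoopB known kg (fb + 1) ((node, false) :: stack) (vis, path)
      = pvLoopB known kg fb stack (vis, path) := by
  have hc : (!PySem.Set.contains vis node && !known.contains node) = false := by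
    rw [← Bool.not_or, h]; rfl
  rw [pvLoopB, if_neg (by decide : ¬ ((false : Bool) = true)), hc,
    if_neg (by decide : ¬ ((false : Bool) = true))]

lemma pvLoopB_step_fresh (known : List String) (kg : List (String × List (String × List String)))
    (fb : Nat) (node : String) (stack : List (String × Bool)) (vis path : List String)
    (h1 : PySem.Set.contains vis node = false) (h2 : known.contains node = false) :
    pvLoopB known kg (fb + 1) ((node, false) :: stack) (vis, path)
      = pvLoopB known kg fb ((pvPrereqs kg node).map (fun p => (p, false)) ++ (node, true) :: stack)
          (PySem.Set.add vis node, path) := by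
  have hc : (!PySem.Set.contains vis node && !known.contains node) = true := by
    rw [h1, h2]; rfl
  rw [pvLoopB, if_neg (by decide : ¬ ((false : Bool) = true)), hc,
    if_pos (rfl : (true : Bool) = true), pvPush_eq]

-- ===== the simulation: the stack loop replays dfs =====

def pvSimDfsP (known : List String) (kg : List (String × List (String × List String))) (fuel : Nat) : Prop :=
  ∀ (c : String) (st : List String × List String) (stack : List (String × Bool)),
    pvPhi kg st.1 < fuel →
    ∃ k, k + pvK kg * pvPhi kg (pvDfsA known kg fuel c st).1 ≤ 2 + pvK kg * pvPhi kg st.1 ∧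
      ∀ fb, pvLoopB known kg (fb + k) ((c, false) :: stack) st
            = pvLoopB known kg fb stack (pvDfsA known kg fuel c st)

lemma pvSimList (known : List String) (kg : List (String × List (String × List String))) (fuel : Nat)
    (H : pvSimDfsP known kg fuel) :
    ∀ (ps : List String) (st : List String × List String) (stack : List (String × Bool)),
      pvPhi kg st.1 < fuel ∨ ps = [] →
      ∃ k, k + pvK kg * pvPhi kg (pvDfsListA known kg fuel ps st).1 ≤ 2 * ps.length + pvK kg * pvPhi kg st.1 ∧
        ∀ fb, pvLoopB known kg (fb + k) (ps.map (fun p => (p, false)) ++ stack) st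
              = pvLoopB known kg fb stack (pvDfsListA known kg fuel ps st) := by
  intro ps
  induction ps with
  | nil =>
    intro st stack _
    refine ⟨0, ?_, fun fb => ?_⟩
    · rw [pvDfsListA]; simp
    · rw [pvDfsListA]; simp
  | cons p ps ih =>
    intro st stack hh
    have hΦ : pvPhi kg st.1 < fuel := by
      rcases hh with h | h
      · exact h
      · simp at h
    obtain ⟨k1, hb1, he1⟩ := H p st (ps.map (fun p => (p, false)) ++ stack) hΦ
    have hΦ2 : pvPhi kg (pvDfsA known kg fuel p st).1 < fuel :=
      lt_of_le_of_lt (pvPhi_dfs_le known kg fuel p st) hΦ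
    obtain ⟨k2, hb2, he2⟩ := ih (pvDfsA known kg fuel p st) stack (Or.inl hΦ2)
    refine ⟨k2 + k1, ?_, fun fb => ?_⟩
    · rw [pvDfsListA]
      simp only [List.length_cons]
      generalize pvK kg * pvPhi kg (pvDfsListA known kg fuel ps (pvDfsA known kg fuel p st)).1 = A at hb2 ⊢
      generalize pvK kg * pvPhi kg (pvDfsA known kg fuel p st).1 = B at hb1 hb2
      generalize pvK kg * pvPhi kg st.1 = C at hb1 ⊢
      omega
    · have e1 : fb + (k2 + k1) = (fb + k2) + k1 := by omega
      simp only [List.map_cons, List.cons_append]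
      rw [e1, he1 (fb + k2), he2 fb, pvDfsListA]

lemma pvSimDfs (known : List String) (kg : List (String × List (String × List String))) :
    ∀ fuel, pvSimDfsP known kg fuel := by
  intro fuel
  induction fuel with
  | zero => intro c st stack h; exact absurd h (Nat.not_lt_zero _)
  | succ n ih =>
    intro c st stack hΦ
    obtain ⟨vis, path⟩ := st
    cases hcond : (PySem.Set.contains vis c || known.contains c) with
    | true =>
      have hA : pvDfsA known kg (n + 1) c (vis, path) = (vis, path) := by
        rw [pvDfsA, if_pos hcond]
      refine ⟨1, ?_, fun fb => ?_⟩
      · rw [hA]; exact Nat.add_le_add (by norm_num) (Nat.le_refl _)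
      · rw [hA, pvLoopB_step_skip known kg fb c stack vis path hcond]
    | false =>
      have hcv : PySem.Set.contains vis c = false := by
        rcases Bool.or_eq_false_iff.1 hcond with ⟨h1, _⟩; exact h1
      have hck : known.contains c = false := by
        rcases Bool.or_eq_false_iff.1 hcond with ⟨_, h2⟩; exact h2
      have hA : pvDfsA known kg (n + 1) c (vis, path)
          = ((pvDfsListA known kg n (pvPrereqs kg c) (PySem.Set.add vis c, path)).1,
             (pvDfsListA known kg n (pvPrereqs kg c) (PySem.Set.add vis c, path)).2 ++ [c]) := by
        rw [pvDfsA, if_neg (by rw [hcond]; decide)]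
      by_cases hk : c ∈ kg.map Prod.fst
      · -- fresh visit of a graph key: the potential strictly drops
        have hΦ1 : pvPhi kg (PySem.Set.add vis c) + 1 ≤ pvPhi kg vis := pvPhi_add_lt kg vis c hk hcv
        have hΦ1' : pvPhi kg (PySem.Set.add vis c) < n := by
          simp only [] at hΦ
          omega
        obtain ⟨k', hb', he'⟩ := pvSimList known kg n ih (pvPrereqs kg c)
          (PySem.Set.add vis c, path) ((c, true) :: stack) (Or.inl hΦ1')
        rcases h2 : pvDfsListA known kg n (pvPrereqs kg c) (PySem.Set.add vis c, path) with ⟨v2, p2⟩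
        rw [h2] at hA hb' he'
        refine ⟨k' + 2, ?_, fun fb => ?_⟩
        · rw [hA]
          have hS : 2 * (pvPrereqs kg c).length ≤ 2 * pvSumPrereqs kg :=
            Nat.mul_le_mul_left 2 (pvPrereqs_le_sum kg c)
          have hmul : pvK kg * (pvPhi kg (PySem.Set.add vis c) + 1) ≤ pvK kg * pvPhi kg vis :=
            Nat.mul_le_mul_left _ hΦ1
          rw [Nat.mul_add, Nat.mul_one] at hmul
          have hK : pvK kg = 2 * pvSumPrereqs kg + 2 := rfl
          simp only [] at hb' ⊢
          generalize pvK kg * pvPhi kg v2 = A at hb' ⊢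
          generalize pvK kg * pvPhi kg (PySem.Set.add vis c) = B at hb' hmul
          generalize pvK kg * pvPhi kg vis = C at hmul ⊢
          omega
        · have e1 : fb + (k' + 2) = ((fb + 1) + k') + 1 := by omega
          rw [e1, pvLoopB_step_fresh known kg ((fb + 1) + k') c stack vis path hcv hck,
            he' (fb + 1), pvLoopB_step_true known kg fb c stack v2 p2, hA]
      · -- fresh visit of a non-key: no prerequisites to push
        have hps : pvPrereqs kg c = [] := pvPrereqs_of_not_key kg c hk
        rw [hps, pvDfsListA] at hA
        refine ⟨2, ?_, fun fb => ?_⟩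
        · rw [hA]
          exact Nat.add_le_add_left (Nat.mul_le_mul_left _ (pvPhi_add_le kg vis c)) 2
        · have e1 : fb + 2 = (fb + 1) + 1 := by omega
          rw [e1, pvLoopB_step_fresh known kg (fb + 1) c stack vis path hcv hck, hps]
          simp only [List.map_nil, List.nil_append]
          rw [pvLoopB_step_true known kg fb c stack (PySem.Set.add vis c) path, hA]

-- ===== dedup pass is the identity on a nodup path whose elements avoid seen =====
lemma pvDedup_id : ∀ (path seen out : List String), path.Nodup →
    (∀ x ∈ path, PySem.Set.contains seen x = false) →
    (path.foldl (fun (acc : List String × List String) c =>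
        if PySem.Set.contains acc.1 c then acc else (PySem.Set.add acc.1 c, acc.2 ++ [c])) (seen, out)).2
      = out ++ path := by
  intro path
  induction path with
  | nil => intro seen out _ _; simp
  | cons c rest ih =>
    intro seen out hnd hfresh
    have hc : PySem.Set.contains seen c = false := hfresh c (List.mem_cons_self ..)
    rw [List.foldl_cons]
    simp only [hc, Bool.false_eq_true, if_false]
    rw [ih (PySem.Set.add seen c) (out ++ [c]) (List.Nodup.of_cons hnd)
      (fun x hx => pvContains_add_ne seen c x (hfresh x (List.mem_cons_of_mem _ hx))
        (fun he => (List.nodup_cons.1 hnd).1 (he ▸ hx)))]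
    simp

-- ===== A's state invariant: path is nodup and inside visited =====
def pvInv (st : List String × List String) : Prop :=
  st.2.Nodup ∧ ∀ x ∈ st.2, PySem.Set.contains st.1 x = true

lemma pvDfsA_new (known : List String) (kg : List (String × List (String × List String))) :
    ∀ fuel, (∀ c st x, x ∈ (pvDfsA known kg fuel c st).2 → x ∈ st.2 ∨ PySem.Set.contains st.1 x = false)
      ∧ (∀ ps st x, x ∈ (pvDfsListA known kg fuel ps st).2 → x ∈ st.2 ∨ PySem.Set.contains st.1 x = false) := by
  intro fuel
  induction fuel with
  | zero =>
    refine ⟨fun c st x h => Or.inl (by rwa [pvDfsA] at h), fun ps => ?_⟩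
    induction ps with
    | nil => intro st x h; rw [pvDfsListA] at h; exact Or.inl h
    | cons p ps ihp =>
      intro st x h
      rw [pvDfsListA] at h
      rcases ihp _ _ h with h1 | h1
      · rw [pvDfsA] at h1; exact Or.inl h1
      · rw [pvDfsA] at h1; exact Or.inr h1
  | succ n ih =>
    have hdfs : ∀ c st x, x ∈ (pvDfsA known kg (n+1) c st).2 → x ∈ st.2 ∨ PySem.Set.contains st.1 x = false := by
      intro c st x h
      obtain ⟨vis, path⟩ := st
      rw [pvDfsA] at h
      split at h
      · exact Or.inl h
      · rename_i hcond
        simp only [Bool.or_eq_true, not_or, Bool.not_eq_true] at hcond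
        simp only [List.mem_append, List.mem_singleton] at h
        rcases h with h | rfl
        · rcases ih.2 (pvPrereqs kg c) (PySem.Set.add vis c, path) x h with h1 | h1
          · exact Or.inl h1
          · refine Or.inr ?_
            cases hv : PySem.Set.contains vis x
            · rfl
            · rw [pvContains_add vis c x hv] at h1; exact h1
        · exact Or.inr hcond.1
    refine ⟨hdfs, fun ps => ?_⟩
    induction ps with
    | nil => intro st x h; rw [pvDfsListA] at h; exact Or.inl h
    | cons p ps ihp =>
      intro st x h
      rw [pvDfsListA] at h
      rcases ihp _ _ h with h1 | h1
      · exact hdfs p st x h1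
      · cases hv : PySem.Set.contains st.1 x
        · exact Or.inr rfl
        · rw [(pvDfsA_grow known kg (n+1)).1 p st x hv] at h1; exact absurd h1 (by decide)

lemma pvDfsA_inv (known : List String) (kg : List (String × List (String × List String))) :
    ∀ fuel, (∀ c st, pvInv st → pvInv (pvDfsA known kg fuel c st))
      ∧ (∀ ps st, pvInv st → pvInv (pvDfsListA known kg fuel ps st)) := by
  intro fuel
  induction fuel with
  | zero =>
    refine ⟨fun c st h => by rwa [pvDfsA], fun ps => ?_⟩
    induction ps with
    | nil => intro st h; rwa [pvDfsListA]
    | cons p ps ihp => intro st h; rw [pvDfsListA]; exact ihp _ (by rwa [pvDfsA])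
  | succ n ih =>
    have hdfs : ∀ c st, pvInv st → pvInv (pvDfsA known kg (n+1) c st) := by
      intro c st hinv
      obtain ⟨vis, path⟩ := st
      rw [pvDfsA]
      split
      · exact hinv
      · rename_i hcond
        simp only [Bool.or_eq_true, not_or, Bool.not_eq_true] at hcond
        have hinv1 : pvInv (PySem.Set.add vis c, path) :=
          ⟨hinv.1, fun x hx => pvContains_add vis c x (hinv.2 x hx)⟩
        have hinv2 := ih.2 (pvPrereqs kg c) (PySem.Set.add vis c, path) hinv1
        refine ⟨?_, ?_⟩
        · rw [List.nodup_append]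
          refine ⟨hinv2.1, List.nodup_singleton _, ?_⟩
          intro a ha b hb
          have hb' : b = c := by simpa using hb
          subst hb'
          intro heq
          subst heq
          rcases (pvDfsA_new known kg n).2 (pvPrereqs kg a) (PySem.Set.add vis a, path) a ha with h1 | h1
          · rw [hinv.2 a h1] at hcond; exact absurd hcond.1 (by decide)
          · rw [pvContains_add_self vis a] at h1; exact absurd h1 (by decide)
        · intro x hx
          simp only [List.mem_append, List.mem_singleton] at hx
          rcases hx with hx | rfl
          · exact hinv2.2 x hx
          · exact (pvDfsA_grow known kg n).2 (pvPrereqs kg x) (PySem.Set.add vis x, path) x (pvContains_add_self vis x)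
    refine ⟨hdfs, fun ps => ?_⟩
    induction ps with
    | nil => intro st h; rwa [pvDfsListA]
    | cons p ps ihp => intro st h; rw [pvDfsListA]; exact ihp _ (hdfs p st h)

-- ===== per-seed equality and assembly =====
lemma pvSeed (known : List String) (kg : List (String × List (String × List String)))
    (c : String) (st : List String × List String) :
    pvLoopB known kg ((2 * pvSumPrereqs kg + 2) * (kg.length + 1) + 2) [(c, false)] st
      = pvDfsA known kg (kg.length + 2) c st := by
  have hΦ : pvPhi kg st.1 < kg.length + 2 :=
    lt_of_le_of_lt (pvPhi_le_length kg st.1) (by omega)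
  obtain ⟨k, hb, he⟩ := pvSimDfs known kg (kg.length + 2) c st [] hΦ
  have hk : k ≤ (2 * pvSumPrereqs kg + 2) * (kg.length + 1) + 2 := by
    have hK : pvK kg = 2 * pvSumPrereqs kg + 2 := rfl
    rw [← hK, show pvK kg * (kg.length + 1) = pvK kg * kg.length + pvK kg from by ring]
    have h1 : pvK kg * pvPhi kg st.1 ≤ pvK kg * kg.length :=
      Nat.mul_le_mul_left _ (pvPhi_le_length kg st.1)
    generalize pvK kg * pvPhi kg (pvDfsA known kg (kg.length + 2) c st).1 = A at hb
    generalize pvK kg * pvPhi kg st.1 = B at hb h1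
    generalize pvK kg * kg.length = C at h1 ⊢
    generalize pvK kg = K
    omega
  rw [← Nat.sub_add_cancel hk, he ((2 * pvSumPrereqs kg + 2) * (kg.length + 1) + 2 - k),
    pvLoopB_nil]

lemma pvFold_eq (known : List String) (kg : List (String × List (String × List String))) :
    ∀ (seeds : List String) (st : List String × List String),
      seeds.foldl (fun st c => pvLoopB known kg ((2 * pvSumPrereqs kg + 2) * (kg.length + 1) + 2) [(c, false)] st) st
        = seeds.foldl (fun st s => pvDfsA known kg (kg.length + 2) s st) st := by
  intro seeds
  induction seeds with
  | nil => intro st; rfl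
  | cons a l ih => intro st; rw [List.foldl_cons, List.foldl_cons, pvSeed, ih]

lemma pvInv_fold (known : List String) (kg : List (String × List (String × List String))) :
    ∀ (seeds : List String) (st : List String × List String), pvInv st →
      pvInv (seeds.foldl (fun st s => pvDfsA known kg (kg.length + 2) s st) st) := by
  intro seeds
  induction seeds with
  | nil => intro st h; exact h
  | cons a l ih =>
    intro st h
    rw [List.foldl_cons]
    exact ih _ ((pvDfsA_inv known kg (kg.length + 2)).1 a st h)

-- ===== VERDICT (by name: the statement is the Claim_ definition above) =====
theorem build_path_from_knowledge_graph_spec : Claim_equal_build_path_from_knowledge_graph := by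
  unfold Claim_equal_build_path_from_knowledge_graph Spec_build_path_from_knowledge_graph
  intro goal known strug kg _
  unfold build_path_from_knowledge_graph build_path_from_knowledge_graph_alt
  simp only [List.foldl_append, List.foldl_cons, List.foldl_nil]
  rw [pvFold_eq, pvSeed]
  have hinv : pvInv (pvDfsA known kg (kg.length + 2) goal
      (strug.foldl (fun st s => pvDfsA known kg (kg.length + 2) s st) ([], []))) :=
    (pvDfsA_inv known kg (kg.length + 2)).1 _ _
      (pvInv_fold known kg strug ([], []) ⟨List.nodup_nil, fun x hx => absurd hx (List.not_mem_nil)⟩)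
  rw [pvDedup_id _ [] [] hinv.1 (fun x _ => rfl)]
  simp
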